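-- pv_equiv track=rewrite | github.com/dreverrse/DreWaifu | utils/helpers.py | next_alert_id
-- ===== SOURCE A (Python) =====
-- def next_alert_id(alerts_list):
--     nums = []
--     for a in alerts_list:
--         try:
--             nums.append(int(a["id"].replace("alert_", "")))
--         except:
--             pass
--     return f"alert_{max(nums, default=0) + 1}"
-- ===== SOURCE B (Python) =====
-- def next_alert_id(alerts_list):
--     def parse(a):
--         try:
--             return int(a["id"].replace("alert_", ""))
--         except:
--             return None
--     nums = sorted(n for n in map(parse, alerts_list) if n is not None)
--     top = nums[-1] if nums else 0
--     return "alert_%d" % (top + 1)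
-- ===== Notes on version B (the rewrite author's own statement) =====
-- stated objective: alternative
-- what changed: Replaces the imperative append-loop plus max(nums, default=0) with a declarative pipeline: map/filter the parsed ids into a sorted list and take its last element (last of a sorted list = maximum), defaulting to 0 when nothing parses.
import Mathlib
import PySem

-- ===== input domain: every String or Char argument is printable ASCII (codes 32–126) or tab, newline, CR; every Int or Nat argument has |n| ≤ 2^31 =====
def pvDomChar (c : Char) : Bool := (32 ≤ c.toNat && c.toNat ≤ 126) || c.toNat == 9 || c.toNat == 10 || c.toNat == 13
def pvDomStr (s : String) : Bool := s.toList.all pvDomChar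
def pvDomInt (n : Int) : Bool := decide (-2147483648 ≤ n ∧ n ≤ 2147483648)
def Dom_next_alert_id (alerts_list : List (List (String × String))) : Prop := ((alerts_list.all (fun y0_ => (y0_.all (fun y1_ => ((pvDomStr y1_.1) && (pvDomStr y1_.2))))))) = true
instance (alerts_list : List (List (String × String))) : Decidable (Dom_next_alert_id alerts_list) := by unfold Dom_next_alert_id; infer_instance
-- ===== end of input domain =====

-- B replaces A's imperative append-loop + max(nums, default=0) with a declarative
-- pipeline: filter-map the parsed ids, sort them, take the last element (default 0).

-- ===== PORT A =====
-- nums = []; for a in alerts_list: try: nums.append(int(a["id"].replace("alert_",""))) except: pass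
-- return f"alert_{max(nums, default=0) + 1}"
def next_alert_id (alerts_list : List (List (String × String))) : String :=
  let nums : List Int := alerts_list.foldl (fun nums a =>
    match (PySem.Dict.mk a).get? "id" with
    | none => nums                                  -- KeyError, swallowed by the bare except
    | some s =>
      match PySem.Int.ofStr? (PySem.Str.replace s "alert_" "") with
      | none => nums                                -- ValueError, swallowed by the bare except
      | some n => nums ++ [n]) []
  "alert_" ++ PySem.Int.toStr ((PySem.List.max? nums (fun y => y)).getD 0 + 1)

-- ===== PORT B =====
-- def parse(a): try: return int(a["id"].replace("alert_","")) except: return None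
def parseId? (a : List (String × String)) : Option Int :=
  match (PySem.Dict.mk a).get? "id" with
  | none => none
  | some s => PySem.Int.ofStr? (PySem.Str.replace s "alert_" "")

-- nums = sorted(n for n in map(parse, alerts_list) if n is not None)
-- top = nums[-1] if nums else 0; return "alert_%d" % (top + 1)
def next_alert_id_alt (alerts_list : List (List (String × String))) : String :=
  let nums : List Int :=
    PySem.List.sorted (alerts_list.filterMap parseId?) (fun x => x) false
  let top : Int := nums.getLast?.getD 0             -- nums[-1] if nums else 0
  "alert_" ++ PySem.Int.toStr (top + 1)             -- "%d" of an int = str(n)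

-- ===== PRECONDITION & SPEC =====
def Spec_next_alert_id (alerts_list : List (List (String × String))) (out : String) : Prop := out = next_alert_id_alt alerts_list
instance (alerts_list : List (List (String × String))) (out : String) : Decidable (Spec_next_alert_id alerts_list out) := by unfold Spec_next_alert_id; infer_instance

-- ===== CLAIM (what is proved, stated in full; the proofs are below) =====
def Claim_equal_next_alert_id : Prop := ∀ (alerts_list : List (List (String × String))), Dom_next_alert_id alerts_list → Spec_next_alert_id alerts_list (next_alert_id alerts_list)

-- ===== LEMMAS AND PROOFS =====

-- A's append loop builds exactly the filter-mapped list of parsed ids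
theorem foldlA_eq_filterMap (alerts : List (List (String × String))) (acc : List Int) :
    alerts.foldl (fun nums a =>
      match (PySem.Dict.mk a).get? "id" with
      | none => nums
      | some s =>
        match PySem.Int.ofStr? (PySem.Str.replace s "alert_" "") with
        | none => nums
        | some n => nums ++ [n]) acc
      = acc ++ alerts.filterMap parseId? := by
  induction alerts generalizing acc with
  | nil => simp
  | cons a rest ih =>
    rw [List.foldl_cons, List.filterMap_cons]
    rcases hg : (PySem.Dict.mk a).get? "id" with _ | s
    · simpa [parseId?, hg] using ih acc
    · rcases ho : PySem.Int.ofStr? (PySem.Str.replace s "alert_" "") with _ | n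
      · simpa [parseId?, hg, ho] using ih acc
      · simpa [parseId?, hg, ho] using ih (acc ++ [n])

-- in a ≤-sorted list every element is bounded by the last one
theorem le_getLast_of_pairwise :
    ∀ (l : List Int), l.Pairwise (· ≤ ·) → ∀ y ∈ l, ∀ (h : l ≠ []), y ≤ l.getLast h := by
  intro l hp
  induction l with
  | nil => intro y hy; simp at hy
  | cons x t ih =>
    intro y hy h
    rcases List.pairwise_cons.1 hp with ⟨hx, ht⟩
    cases t with
    | nil => simp at hy; simp [hy, List.getLast]
    | cons z u =>
      rw [List.getLast_cons (by simp)]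
      rcases List.mem_cons.1 hy with rfl | hmem
      · exact le_trans (hx _ (List.getLast_mem (by simp)))
          (ih ht _ (List.getLast_mem (by simp)) (by simp))
      · exact ih ht _ hmem (by simp)

-- max(xs, default=0)  =  last of sorted(xs), default 0
theorem max?_eq_getLast_sorted (xs : List Int) :
    (PySem.List.max? xs (fun y => y)).getD 0
      = (PySem.List.sorted xs (fun x => x) false).getLast?.getD 0 := by
  cases hxs : xs with
  | nil => rfl
  | cons x t =>
    have hm : PySem.List.max? (x :: t) (fun y => y) = some (t.foldl max x) :=
      PySem.List.max?_id_cons x t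
    set s := PySem.List.sorted (x :: t) (fun x => x) false with hs
    have hsne : s ≠ [] := by
      intro h0
      have := (PySem.List.sorted_eq_nil_iff _ _ _).1 (hs ▸ h0)
      simp at this
    have hl : s.getLast? = some (s.getLast hsne) := List.getLast?_eq_some_getLast hsne
    rw [hm, hl]
    simp only [Option.getD_some]
    -- the last of s is the max: mutual ≤
    have hperm : s.Perm (x :: t) := PySem.List.sorted_perm (x :: t) (fun x => x) false
    have hpw : s.Pairwise (· ≤ ·) := by
      simpa using PySem.List.sorted_pairwise (xs := x :: t) (key := fun x => x)
    have hmmem : t.foldl max x ∈ x :: t := PySem.List.max?_mem hm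
    have hmax : ∀ y ∈ x :: t, y ≤ t.foldl max x := by
      intro y hy; simpa using PySem.List.max?_isMax hm y hy
    have hlastmem : s.getLast hsne ∈ x :: t := hperm.mem_iff.1 (List.getLast_mem hsne)
    have h1 : s.getLast hsne ≤ t.foldl max x := hmax _ hlastmem
    have h2 : t.foldl max x ≤ s.getLast hsne :=
      le_getLast_of_pairwise s hpw _ (hperm.mem_iff.2 hmmem) hsne
    exact le_antisymm h2 h1

-- ===== VERDICT (by name: the statement is the Claim_ definition above) =====
theorem next_alert_id_spec : Claim_equal_next_alert_id := by
  intro alerts _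
  unfold Spec_next_alert_id next_alert_id next_alert_id_alt
  rw [foldlA_eq_filterMap alerts []]
  simp only [List.nil_append]
  rw [max?_eq_getLast_sorted]
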